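-- pv_equiv track=rewrite | github.com/KotatuBot/Encrypto | mixcolumns.py | bin_create
-- ===== SOURCE A (Python) =====
-- def bin_create(shisu_list):
--     """
--     指数のリストからbinを生成
--     """
--     mojiretu = ""
--     for i in range(shisu_list[0]+1):
--         if i in shisu_list:
--             mojiretu += "1"
--         else:
--             mojiretu += "0"
--     bin_c = mojiretu+"b0"
--     c_bin = bin_c[::-1]
--     return c_bin
-- ===== SOURCE B (Python) =====
-- def bin_create(shisu_list):
--     n = shisu_list[0] + 1
--     bits = ['0'] * n
--     for e in shisu_list:
--         if 0 <= e < n: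
--             bits[e] = '1'
--     return '0b' + ''.join(bits[::-1])
-- ===== Notes on version B (the rewrite author's own statement) =====
-- stated objective: alternative
-- what changed: B scatters each exponent into a preallocated bit array (looping over the exponents) instead of scanning every position from 0 up to the first element and testing list membership at each, then joins and reverses once.
import Mathlib
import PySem

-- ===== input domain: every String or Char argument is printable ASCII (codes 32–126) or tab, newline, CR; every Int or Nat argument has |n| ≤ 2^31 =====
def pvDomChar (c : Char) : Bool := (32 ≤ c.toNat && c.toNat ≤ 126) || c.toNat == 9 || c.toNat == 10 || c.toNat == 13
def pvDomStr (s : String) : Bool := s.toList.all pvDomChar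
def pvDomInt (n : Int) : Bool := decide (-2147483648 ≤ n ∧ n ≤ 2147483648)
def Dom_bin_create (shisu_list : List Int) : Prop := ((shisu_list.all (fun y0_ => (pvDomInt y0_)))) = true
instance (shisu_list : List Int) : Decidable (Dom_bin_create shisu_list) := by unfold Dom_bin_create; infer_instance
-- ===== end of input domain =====

-- B replaces A's position-by-position membership scan with a single scatter pass over the
-- exponents into a preallocated bit array.

-- ===== PORT A =====
-- literal port of A; strings are built as List Char ("" = []), '+=' is list append,
-- '[::-1]' is reverse (exact per PySem.Str.slice?_none_none_neg_one); indexing the first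
-- element raises IndexError on the empty list, which Pre_ excludes (the `none` branch is unreachable there).
def bin_create (shisu_list : List Int) : String :=
  match PySem.List.pyGet? shisu_list 0 with
  | none => ""   -- IndexError: outside Pre_
  | some h =>
    let mojiretu : List Char :=
      (PySem.List.pyRange 0 (h + 1) 1).foldl
        (fun acc i => acc ++ [if i ∈ shisu_list then '1' else '0']) []
    let bin_c := mojiretu ++ ['b', '0']
    String.ofList bin_c.reverse

-- ===== PORT B =====
-- literal port of Source B: ['0'] * n (empty for n ≤ 0), scatter each in-range exponent,
-- then '0b' + ''.join(bits[::-1]).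
def bin_create_alt (shisu_list : List Int) : String :=
  match PySem.List.pyGet? shisu_list 0 with
  | none => ""   -- IndexError: outside Pre_
  | some h =>
    let n := h + 1
    let bits : List Char := List.replicate n.toNat '0'
    let bits := shisu_list.foldl
      (fun bs e => if 0 ≤ e ∧ e < n then bs.set e.toNat '1' else bs) bits
    "0b" ++ String.ofList bits.reverse

-- ===== PRECONDITION & SPEC =====
-- A indexes the first element, which raises IndexError on the empty list.
def Pre_bin_create (shisu_list : List Int) : Prop := shisu_list ≠ []
instance (shisu_list : List Int) : Decidable (Pre_bin_create shisu_list) := by unfold Pre_bin_create; infer_instance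
def pvWitness_bin_create : List Int := ([3, 0, 2] : List Int)

def Spec_bin_create (shisu_list : List Int) (out : String) : Prop := out = bin_create_alt shisu_list
instance (shisu_list : List Int) (out : String) : Decidable (Spec_bin_create shisu_list out) := by unfold Spec_bin_create; infer_instance

-- ===== CLAIM (what is proved, stated in full; the proofs are below) =====
def Claim_equal_bin_create : Prop := ∀ (shisu_list : List Int), Dom_bin_create shisu_list → Pre_bin_create shisu_list → Spec_bin_create shisu_list (bin_create shisu_list)

-- ===== LEMMAS AND PROOFS =====

-- the scatter loop preserves the length of the bit array
theorem scatter_length (L : List Int) (n : Int) (bs : List Char) :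
    (L.foldl (fun bs e => if 0 ≤ e ∧ e < n then bs.set e.toNat '1' else bs) bs).length
      = bs.length := by
  induction L generalizing bs with
  | nil => rfl
  | cons e L ih =>
      simp only [List.foldl_cons]
      rw [ih]; split <;> simp

-- the k-th bit after the scatter loop: '1' if k occurs in L, otherwise the old bit
theorem scatter_get (L : List Int) (n : Int) (bs : List Char) (hn : bs.length = n.toNat)
    (k : Nat) (hk : k < bs.length) :
    (L.foldl (fun bs e => if 0 ≤ e ∧ e < n then bs.set e.toNat '1' else bs) bs)[k]'(by
        rw [scatter_length]; exact hk)
      = if (k : Int) ∈ L then '1' else bs[k] := by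
  induction L generalizing bs with
  | nil => simp
  | cons e L ih =>
      simp only [List.foldl_cons]
      have hlen : (if 0 ≤ e ∧ e < n then bs.set e.toNat '1' else bs).length = bs.length := by
        split <;> simp
      rw [ih _ (by rw [hlen, hn]) (by rw [hlen]; exact hk)]
      by_cases hmem : (k : Int) ∈ L
      · simp [hmem]
      · by_cases hke : (k : Int) = e
        · have h1 : 0 ≤ e ∧ e < n := by
            constructor
            · omega
            · have : k < n.toNat := hn ▸ hk
              omega
          have h2 : e.toNat = k := by omega
          simp only [if_pos h1, h2, List.getElem_set_self, if_pos (List.mem_cons.2 (Or.inl hke))]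
          simp
        · have hne : ¬ ((k : Int) ∈ e :: L) := by simp [hke, hmem]
          rw [if_neg hmem, if_neg hne]
          split
          · next hc => exact List.getElem_set_ne (l := bs) (a := '1') (i := e.toNat) (j := k) (by omega) _
          · rfl

theorem mojiretu_eq (L : List Int) (n : Int) :
    (PySem.List.pyRange 0 n 1).foldl
        (fun acc i => acc ++ [if i ∈ L then '1' else '0']) ([] : List Char)
      = (PySem.List.pyRange 0 n 1).map (fun i => if i ∈ L then '1' else '0') := by
  rw [PySem.List.foldl_append_singleton_eq_map]; rfl

-- the bit arrays of the two ports are equal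
theorem bits_eq (L : List Int) (n : Int) :
    L.foldl (fun bs e => if 0 ≤ e ∧ e < n then bs.set e.toNat '1' else bs)
        (List.replicate n.toNat '0')
      = (PySem.List.pyRange 0 n 1).map (fun i => if i ∈ L then '1' else '0') := by
  apply List.ext_getElem
  · rw [scatter_length]; simp [PySem.List.length_pyRange_one]
  · intro k h1 h2
    rw [scatter_length] at h1
    have hk : k < n.toNat := by simpa using h1
    rw [scatter_get L n _ (by simp) k (by simpa using hk)]
    rw [List.getElem_map, PySem.List.getElem_pyRange_one]
    simp only [zero_add]
    split <;> simp

-- ===== VERDICT (by name: the statement is the Claim_ definition above) =====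
theorem bin_create_spec : Claim_equal_bin_create := by
  intro L _ hpre
  unfold Spec_bin_create bin_create bin_create_alt
  match hL : L with
  | [] => exact absurd rfl hpre
  | h :: t =>
    rw [PySem.List.pyGet?_zero_cons]
    simp only
    rw [mojiretu_eq, bits_eq]
    have hr : ∀ xs : List Char, (xs ++ ['b','0']).reverse = ['0','b'] ++ xs.reverse := by
      intro xs; simp
    rw [hr, String.ofList_append]
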